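-- pv_equiv track=rewrite | github.com/wazuh/wazuh | tools/policy-migration/refactor_regex.py | _has_literal_quants_in_payload
-- ===== SOURCE A (Python) =====
-- from typing import List, Tuple, Set, Optional
--
-- _QUANTIFIER_PREV_ALLOWED = set(['w', 'd', 's', 't', 'p', 'W', 'D', 'S', '.'])
--
-- def _has_literal_quants_in_payload(payload: str, quote_char: Optional[str]) -> bool:
--     i = 0
--     n = len(payload)
--     def prev_token_allows_quantifier(idx: int) -> bool:
--         if idx <= 0:
--             return False
--         if quote_char == '"':
--             if idx - 3 >= 0 and payload[idx - 3] == '\\' and payload[idx - 2] == '\\' and payload[idx - 1] in _QUANTIFIER_PREV_ALLOWED: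
--                 return True
--         else:
--             if idx - 2 >= 0 and payload[idx - 2] == '\\' and payload[idx - 1] in _QUANTIFIER_PREV_ALLOWED:
--                 return True
--         return False
--     while i < n:
--         if payload[i] in ('*', '+') and not prev_token_allows_quantifier(i):
--             return True
--         i += 1
--     return False
-- ===== SOURCE B (Python) =====
-- from typing import Optional
--
-- _ALLOWED = set('wdstpWDS.')
--
--
-- def _has_literal_quants_in_payload(payload: str, quote_char: Optional[str]) -> bool:
--     # Staged passes instead of a per-position lookbehind loop:
--     # (1) collect every quantifier position, (2) collect every position that is
--     # "protected" (immediately preceded by an allowed escape sequence),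
--     # (3) answer = the quantifier set is not contained in the protected set.
--     n = len(payload)
--     esc = '\\\\' if quote_char == '"' else '\\'
--     k = len(esc)
--     quants = {i for i in range(n) if payload[i] in ('*', '+')}
--     protected = {i + k + 1 for i in range(n - k)
--                  if payload[i:i + k] == esc and payload[i + k] in _ALLOWED}
--     return not quants <= protected
-- ===== Notes on version B (the rewrite author's own statement) =====
-- stated objective: alternative
-- what changed: Replaces A's single index loop with a per-position lookbehind check by three staged passes: build the set of quantifier positions, build the set of positions protected by an allowed escape sequence, and return whether the first set is not contained in the second.
import Mathlib
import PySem

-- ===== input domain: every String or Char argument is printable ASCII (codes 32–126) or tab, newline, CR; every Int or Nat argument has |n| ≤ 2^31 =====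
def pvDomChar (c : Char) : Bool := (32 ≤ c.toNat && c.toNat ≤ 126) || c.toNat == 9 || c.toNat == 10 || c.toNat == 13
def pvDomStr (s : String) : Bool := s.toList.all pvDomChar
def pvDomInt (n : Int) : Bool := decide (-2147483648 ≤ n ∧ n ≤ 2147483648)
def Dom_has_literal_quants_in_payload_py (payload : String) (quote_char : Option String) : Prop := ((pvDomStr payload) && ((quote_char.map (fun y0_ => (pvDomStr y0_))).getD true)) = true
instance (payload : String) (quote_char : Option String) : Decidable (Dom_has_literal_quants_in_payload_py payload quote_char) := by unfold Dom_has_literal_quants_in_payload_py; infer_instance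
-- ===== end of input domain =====

-- B replaces A's index loop with staged passes: a quantifier-position set, a
-- protected-position set, and a subset test (objective: alternative decomposition).


-- ===== PORT A =====
-- _QUANTIFIER_PREV_ALLOWED = set(['w','d','s','t','p','W','D','S','.'])
def pvQuantPrevAllowed : PySem.Set Char :=
  PySem.Set.ofList ['w', 'd', 's', 't', 'p', 'W', 'D', 'S', '.']

-- inner helper prev_token_allows_quantifier (closure over payload, quote_char)
def pvPrevAllows (payload : List Char) (quote_char : Option String) (idx : Int) : Bool :=
  if idx ≤ 0 then false
  else if quote_char == some "\"" then
    decide (0 ≤ idx - 3) && (PySem.List.pyGet? payload (idx - 3) == some '\\')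
      && (PySem.List.pyGet? payload (idx - 2) == some '\\')
      && ((PySem.List.pyGet? payload (idx - 1)).any
            (fun c => PySem.Set.contains pvQuantPrevAllowed c))
  else
    decide (0 ≤ idx - 2) && (PySem.List.pyGet? payload (idx - 2) == some '\\')
      && ((PySem.List.pyGet? payload (idx - 1)).any
            (fun c => PySem.Set.contains pvQuantPrevAllowed c))

-- while i < n: …  (i only ever 0 ≤ i < n, so the Nat index is exact)
def pvWhileA (payload : List Char) (quote_char : Option String) (i : Nat) : Bool :=
  if h : i < payload.length then
    if (payload[i] == '*' || payload[i] == '+')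
        && !(pvPrevAllows payload quote_char (i : Int)) then true
    else pvWhileA payload quote_char (i + 1)
  else false
termination_by payload.length - i

def has_literal_quants_in_payload_py (payload : String) (quote_char : Option String) : Bool :=
  pvWhileA payload.toList quote_char 0

-- ===== PORT B =====
-- _ALLOWED = set('wdstpWDS.')
def pvAllowedB : PySem.Set Char := PySem.Set.ofList "wdstpWDS.".toList

-- quants = {i for i in range(n) if payload[i] in ('*','+')}
def pvQuantsB (cs : List Char) : PySem.Set Nat :=
  PySem.Set.ofList ((List.range cs.length).filter
    (fun i => cs.getD i '\u0000' == '*' || cs.getD i '\u0000' == '+'))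

-- protected = {i+k+1 for i in range(n-k) if payload[i:i+k] == esc and payload[i+k] in _ALLOWED}
def pvProtectedB (cs : List Char) (esc : List Char) : PySem.Set Nat :=
  PySem.Set.ofList
    (((List.range (cs.length - esc.length)).filter
        (fun i => decide ((cs.drop i).take esc.length = esc)
          && PySem.Set.contains pvAllowedB (cs.getD (i + esc.length) '\u0000'))).map
      (fun i => i + esc.length + 1))

-- return not quants <= protected
def has_literal_quants_in_payload_py_alt (payload : String) (quote_char : Option String) : Bool :=
  let cs := payload.toList
  let esc : List Char := if quote_char == some "\"" then ['\\', '\\'] else ['\\']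
  !(PySem.Set.issubset (pvQuantsB cs) (pvProtectedB cs esc))

-- ===== PRECONDITION & SPEC =====
def Spec_has_literal_quants_in_payload_py (payload : String) (quote_char : Option String) (out : Bool) : Prop := out = has_literal_quants_in_payload_py_alt payload quote_char
instance (payload : String) (quote_char : Option String) (out : Bool) : Decidable (Spec_has_literal_quants_in_payload_py payload quote_char out) := by unfold Spec_has_literal_quants_in_payload_py; infer_instance

-- ===== CLAIM (what is proved, stated in full; the proofs are below) =====
def Claim_equal_has_literal_quants_in_payload_py : Prop := ∀ (payload : String) (quote_char : Option String), Dom_has_literal_quants_in_payload_py payload quote_char → Spec_has_literal_quants_in_payload_py payload quote_char (has_literal_quants_in_payload_py payload quote_char)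

-- ===== LEMMAS AND PROOFS =====

-- A's loop returns true iff some position ≥ i holds an unprotected quantifier
lemma pvWhileA_iff (cs : List Char) (qc : Option String) :
    ∀ k i, cs.length - i = k →
      (pvWhileA cs qc i = true ↔
        ∃ j, i ≤ j ∧ ∃ hj : j < cs.length,
          (cs[j] == '*' || cs[j] == '+') = true ∧ pvPrevAllows cs qc (j : Int) = false) := by
  intro k
  induction k with
  | zero =>
    intro i hk
    rw [pvWhileA]
    have hni : ¬ i < cs.length := by omega
    simp only [hni, dite_false]
    constructor
    · intro h; exact absurd h (by simp)
    · rintro ⟨j, hij, hj, -⟩; omega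
  | succ k ih =>
    intro i hk
    have hi : i < cs.length := by omega
    rw [pvWhileA]
    simp only [hi, dif_pos]
    cases hc : ((cs[i] == '*' || cs[i] == '+') && !(pvPrevAllows cs qc (i : Int))) with
    | true =>
      rw [if_pos rfl]
      simp only [Bool.and_eq_true, Bool.not_eq_true'] at hc
      constructor
      · intro _; exact ⟨i, le_refl _, hi, hc.1, hc.2⟩
      · intro _; rfl
    | false =>
      rw [if_neg (by simp)]
      rw [ih (i + 1) (by omega)]
      constructor
      · rintro ⟨j, hij, hj, h1, h2⟩; exact ⟨j, by omega, hj, h1, h2⟩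
      · rintro ⟨j, hij, hj, h1, h2⟩
        refine ⟨j, ?_, hj, h1, h2⟩
        rcases Nat.eq_or_lt_of_le hij with rfl | h
        · exfalso; simp [h1, h2] at hc
        · omega

lemma pvQuantsB_mem (cs : List Char) (j : Nat) :
    j ∈ pvQuantsB cs ↔ ∃ hj : j < cs.length, (cs[j] == '*' || cs[j] == '+') = true := by
  unfold pvQuantsB
  rw [PySem.Set.mem_ofList]
  simp only [List.mem_filter, List.mem_range]
  constructor
  · rintro ⟨hj, hq⟩
    exact ⟨hj, by rwa [List.getD_eq_getElem cs _ hj] at hq⟩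
  · rintro ⟨hj, hq⟩
    exact ⟨hj, by rwa [List.getD_eq_getElem cs _ hj]⟩

lemma pvProtectedB_mem (cs : List Char) (esc : List Char) (j : Nat) :
    j ∈ pvProtectedB cs esc ↔
      ∃ i, i < cs.length - esc.length ∧ (cs.drop i).take esc.length = esc ∧
        PySem.Set.contains pvAllowedB (cs.getD (i + esc.length) '\u0000') = true ∧
        j = i + esc.length + 1 := by
  unfold pvProtectedB
  rw [PySem.Set.mem_ofList]
  simp only [List.mem_map, List.mem_filter, List.mem_range, Bool.and_eq_true, decide_eq_true_eq]
  constructor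
  · rintro ⟨i, ⟨hi, hs, ha⟩, rfl⟩; exact ⟨i, hi, hs, ha, rfl⟩
  · rintro ⟨i, hi, hs, ha, rfl⟩; exact ⟨i, ⟨hi, hs, ha⟩, rfl⟩

-- a length-2 window equals ['\\','\\'] iff the two positions both hold '\\'
lemma take2_eq (cs : List Char) (i : Nat) (h : i + 1 < cs.length) :
    (cs.drop i).take 2 = ['\\', '\\'] ↔ cs[i]'(by omega) = '\\' ∧ cs[i+1]'h = '\\' := by
  rcases hd : cs.drop i with _ | ⟨a, _ | ⟨b, rest⟩⟩
  · have := congrArg List.length hd; simp at this; omega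
  · have := congrArg List.length hd; simp at this; omega
  · have d0 : cs.drop i = cs[i]'(by omega) :: cs.drop (i + 1) := List.drop_eq_getElem_cons (by omega)
    rw [hd] at d0
    have d1 : cs.drop (i + 1) = cs[i+1]'h :: cs.drop (i + 2) := List.drop_eq_getElem_cons (by omega)
    injection d0 with ha htl
    rw [← htl] at d1
    injection d1 with hb _
    simp [← ha, ← hb]

lemma take1_eq (cs : List Char) (i : Nat) (h : i < cs.length) :
    (cs.drop i).take 1 = ['\\'] ↔ cs[i]'h = '\\' := by
  rcases hd : cs.drop i with _ | ⟨a, rest⟩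
  · have := congrArg List.length hd; simp at this; omega
  · have d0 : cs.drop i = cs[i]'h :: cs.drop (i + 1) := List.drop_eq_getElem_cons h
    rw [hd] at d0
    injection d0 with ha _
    simp [← ha]

lemma allowed_sets_eq : pvAllowedB = pvQuantPrevAllowed := by decide

lemma allowed_contains_iff (c : Char) :
    PySem.Set.contains pvAllowedB c = true ↔ c ∈ pvQuantPrevAllowed := by
  rw [allowed_sets_eq]
  simp [PySem.Set.contains]

-- protected-set membership coincides with A's lookbehind predicate, case quote_char = '"'
lemma prot_iff_allows2 (cs : List Char) (qc : Option String) (hq : (qc == some "\"") = true)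
    (j : Nat) (hj : j < cs.length) :
    j ∈ pvProtectedB cs ['\\', '\\'] ↔ pvPrevAllows cs qc (j : Int) = true := by
  rw [pvProtectedB_mem]
  simp only [show (['\\', '\\'] : List Char).length = 2 from rfl]
  constructor
  · rintro ⟨i, hi, hs, ha, rfl⟩
    have h1 : i + 1 < cs.length := by omega
    rw [take2_eq cs i h1] at hs
    have h0 : ¬ (((i + 2 + 1 : Nat) : Int) ≤ 0) := by push_cast; omega
    rw [pvPrevAllows, if_neg h0, if_pos hq]
    have e3 : ((i + 2 + 1 : Nat) : Int) - 3 = ((i : Nat) : Int) := by push_cast; omega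
    have e2 : ((i + 2 + 1 : Nat) : Int) - 2 = ((i + 1 : Nat) : Int) := by push_cast; omega
    have e1 : ((i + 2 + 1 : Nat) : Int) - 1 = ((i + 2 : Nat) : Int) := by push_cast; omega
    rw [e3, e2, e1]
    simp only [PySem.List.pyGet?_natCast]
    rw [List.getElem?_eq_getElem (by omega), List.getElem?_eq_getElem (by omega),
        List.getElem?_eq_getElem (by omega)]
    rw [List.getD_eq_getElem cs _ (by omega : i + 2 < cs.length)] at ha
    rw [allowed_contains_iff] at ha
    simp [hs.1, hs.2, Option.any, ha]
  · intro hA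
    rw [pvPrevAllows] at hA
    by_cases h0 : ((j : Nat) : Int) ≤ 0
    · rw [if_pos h0] at hA; exact absurd hA (by simp)
    rw [if_neg h0, if_pos hq] at hA
    have hj3 : 3 ≤ j := by
      rcases Nat.lt_or_ge j 3 with h | h
      · exfalso
        have hneg : ¬ (0 ≤ ((j : Nat) : Int) - 3) := by omega
        simp only [Bool.and_eq_true, decide_eq_true_eq] at hA
        exact hneg hA.1.1.1
      · exact h
    refine ⟨j - 3, by omega, ?_, ?_, by omega⟩
    · have e3 : ((j : Nat) : Int) - 3 = ((j - 3 : Nat) : Int) := by omega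
      have e2 : ((j : Nat) : Int) - 2 = ((j - 2 : Nat) : Int) := by omega
      rw [e3, e2] at hA
      simp only [PySem.List.pyGet?_natCast] at hA
      rw [List.getElem?_eq_getElem (by omega : j - 3 < cs.length),
          List.getElem?_eq_getElem (by omega : j - 2 < cs.length)] at hA
      rw [take2_eq cs (j - 3) (by omega)]
      simp only [Bool.and_eq_true, beq_iff_eq, Option.some.injEq] at hA
      exact ⟨hA.1.1.2, by have := hA.1.2; simpa [show j - 3 + 1 = j - 2 by omega] using this⟩
    · have e1 : ((j : Nat) : Int) - 1 = ((j - 1 : Nat) : Int) := by omega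
      rw [e1] at hA
      simp only [PySem.List.pyGet?_natCast] at hA
      rw [List.getElem?_eq_getElem (by omega : j - 1 < cs.length)] at hA
      rw [List.getD_eq_getElem cs _ (by omega : j - 3 + 2 < cs.length)]
      rw [allowed_contains_iff]
      simp only [Bool.and_eq_true, Option.any] at hA
      have := hA.2
      simp only [show j - 3 + 2 = j - 1 by omega]
      simpa using this

-- protected-set membership coincides with A's lookbehind predicate, other quote_char
lemma prot_iff_allows1 (cs : List Char) (qc : Option String) (hq : (qc == some "\"") = false)
    (j : Nat) (hj : j < cs.length) :
    j ∈ pvProtectedB cs ['\\'] ↔ pvPrevAllows cs qc (j : Int) = true := by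
  rw [pvProtectedB_mem]
  simp only [show (['\\'] : List Char).length = 1 from rfl]
  constructor
  · rintro ⟨i, hi, hs, ha, rfl⟩
    rw [take1_eq cs i (by omega)] at hs
    have h0 : ¬ (((i + 1 + 1 : Nat) : Int) ≤ 0) := by push_cast; omega
    rw [pvPrevAllows, if_neg h0, if_neg (by simp [hq])]
    have e2 : ((i + 1 + 1 : Nat) : Int) - 2 = ((i : Nat) : Int) := by push_cast; omega
    have e1 : ((i + 1 + 1 : Nat) : Int) - 1 = ((i + 1 : Nat) : Int) := by push_cast; omega
    rw [e2, e1]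
    simp only [PySem.List.pyGet?_natCast]
    rw [List.getElem?_eq_getElem (by omega), List.getElem?_eq_getElem (by omega)]
    rw [List.getD_eq_getElem cs _ (by omega : i + 1 < cs.length)] at ha
    rw [allowed_contains_iff] at ha
    simp [hs, Option.any, ha]
  · intro hA
    rw [pvPrevAllows] at hA
    by_cases h0 : ((j : Nat) : Int) ≤ 0
    · rw [if_pos h0] at hA; exact absurd hA (by simp)
    rw [if_neg h0, if_neg (by simp [hq])] at hA
    have hj2 : 2 ≤ j := by
      rcases Nat.lt_or_ge j 2 with h | h
      · exfalso
        have hneg : ¬ (0 ≤ ((j : Nat) : Int) - 2) := by omega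
        simp only [Bool.and_eq_true, decide_eq_true_eq] at hA
        exact hneg hA.1.1
      · exact h
    refine ⟨j - 2, by omega, ?_, ?_, by omega⟩
    · have e2 : ((j : Nat) : Int) - 2 = ((j - 2 : Nat) : Int) := by omega
      rw [e2] at hA
      simp only [PySem.List.pyGet?_natCast] at hA
      rw [List.getElem?_eq_getElem (by omega : j - 2 < cs.length)] at hA
      rw [take1_eq cs (j - 2) (by omega)]
      simp only [Bool.and_eq_true, beq_iff_eq, Option.some.injEq] at hA
      exact hA.1.2
    · have e1 : ((j : Nat) : Int) - 1 = ((j - 1 : Nat) : Int) := by omega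
      rw [e1] at hA
      simp only [PySem.List.pyGet?_natCast] at hA
      rw [List.getElem?_eq_getElem (by omega : j - 1 < cs.length)] at hA
      rw [List.getD_eq_getElem cs _ (by omega : j - 2 + 1 < cs.length)]
      rw [allowed_contains_iff]
      simp only [Bool.and_eq_true, Option.any] at hA
      have := hA.2
      simp only [show j - 2 + 1 = j - 1 by omega]
      simpa using this

-- both branches of the esc choice, packaged
lemma prot_iff_allows (cs : List Char) (qc : Option String) (j : Nat) (hj : j < cs.length) :
    j ∈ pvProtectedB cs (if qc == some "\"" then ['\\', '\\'] else ['\\'])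
      ↔ pvPrevAllows cs qc (j : Int) = true := by
  cases hqc : (qc == some "\"") with
  | true =>
    rw [if_pos rfl]
    exact prot_iff_allows2 cs qc hqc j hj
  | false =>
    rw [if_neg (by simp)]
    exact prot_iff_allows1 cs qc hqc j hj

-- ===== VERDICT (by name: the statement is the Claim_ definition above) =====
theorem has_literal_quants_in_payload_py_spec : Claim_equal_has_literal_quants_in_payload_py := by
  intro payload qc _
  unfold Spec_has_literal_quants_in_payload_py
  unfold has_literal_quants_in_payload_py has_literal_quants_in_payload_py_alt
  show pvWhileA payload.toList qc 0
      = !(PySem.Set.issubset (pvQuantsB payload.toList)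
          (pvProtectedB payload.toList (if qc == some "\"" then ['\\', '\\'] else ['\\'])))
  have key :
      pvWhileA payload.toList qc 0 = true ↔
        (!(PySem.Set.issubset (pvQuantsB payload.toList)
          (pvProtectedB payload.toList (if qc == some "\"" then ['\\', '\\'] else ['\\'])))) = true := by
    rw [pvWhileA_iff payload.toList qc payload.toList.length 0 (by omega)]
    rw [Bool.not_eq_true', Bool.eq_false_iff]
    constructor
    · rintro ⟨j, -, hj, hq', hpa⟩ hsub
      have hall := (PySem.Set.issubset_iff _ _).mp hsub
      have hmem := hall j ((pvQuantsB_mem payload.toList j).mpr ⟨hj, hq'⟩)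
      rw [prot_iff_allows payload.toList qc j hj] at hmem
      rw [hmem] at hpa
      exact absurd hpa (by simp)
    · intro hnsub
      have hnall : ¬ ∀ x ∈ pvQuantsB payload.toList,
          x ∈ pvProtectedB payload.toList (if qc == some "\"" then ['\\', '\\'] else ['\\']) :=
        fun h => hnsub ((PySem.Set.issubset_iff _ _).mpr h)
      rcases not_forall.mp hnall with ⟨j, hjcon⟩
      rcases Classical.not_imp.mp hjcon with ⟨hjq, hnp⟩
      rcases (pvQuantsB_mem payload.toList j).mp hjq with ⟨hj, hq'⟩
      refine ⟨j, Nat.zero_le _, hj, hq', ?_⟩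
      rw [Bool.eq_false_iff]
      intro hpa
      exact hnp ((prot_iff_allows payload.toList qc j hj).mpr hpa)
  cases hW : pvWhileA payload.toList qc 0 with
  | true => exact (key.mp hW).symm
  | false =>
    cases hB : (!(PySem.Set.issubset (pvQuantsB payload.toList)
        (pvProtectedB payload.toList (if qc == some "\"" then ['\\', '\\'] else ['\\'])))) with
    | true => exact absurd (key.mpr hB) (by simp [hW])
    | false => rfl
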